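-- pv_equiv track=rewrite | github.com/sujitpal/mlia-examples | src/student-alcohol/preprocess.py | get_output_cols
-- ===== SOURCE A (Python) =====
-- import operator
--
-- JOB_DICT = { "teacher": [1, 0, 0, 0, 0],
--              "health": [0, 1, 0, 0, 0],
--              "services": [0, 0, 1, 0, 0],
--              "at_home": [0, 0, 0, 1, 0],
--              "other": [0, 0, 0, 0, 1] }
--
-- REASON_DICT = { "home": [1, 0, 0, 0],
--                 "reputation": [0, 1, 0, 0],
--                 "course": [0, 0, 1, 0],
--                 "other": [0, 0, 0, 1] }
--
-- GUARDIAN_DICT = { "mother": [1, 0, 0],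
--                   "father": [0, 1, 0],
--                   "other": [0, 0, 1] }
--
-- def expand_options(colvalues):
--     options = sorted([(k, v.index(1)) for k, v in colvalues.items()],
--                       key=operator.itemgetter(1))
--     return [k for k, v in options]
--
-- def get_output_cols(colnames):
--     ocolnames = []
--     ocolnames.append("subject")
--     for colname in colnames:
--         if colname in ["Mjob", "Fjob"]:
--             for option in expand_options(JOB_DICT):
--                 ocolnames.append(":".join([colname, option]))
--         elif colname == "reason":
--             for option in expand_options(REASON_DICT):
--                 ocolnames.append(":".join([colname, option]))
--         elif colname == "guardian":
--             for option in expand_options(GUARDIAN_DICT):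
--                 ocolnames.append(":".join([colname, option]))
--         elif colname in ["Dalc", "Walc"]:
--             continue
--         else:
--             ocolnames.append(colname)
--     ocolnames.append("alcohol")
--     return ocolnames
-- ===== SOURCE B (Python) =====
-- # Single precomputed table mapping each special column name to its full list of
-- # output names (options already in expand_options' order, i.e. by v.index(1));
-- # Dalc/Walc map to []; everything else defaults to [colname]. One uniform pass.
-- _JOB_COLS = ["teacher", "health", "services", "at_home", "other"]
-- _TABLE = {
--     "Mjob": ["Mjob:" + o for o in _JOB_COLS],
--     "Fjob": ["Fjob:" + o for o in _JOB_COLS],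
--     "reason": ["reason:home", "reason:reputation", "reason:course", "reason:other"],
--     "guardian": ["guardian:mother", "guardian:father", "guardian:other"],
--     "Dalc": [],
--     "Walc": [],
-- }
--
-- def get_output_cols(colnames):
--     return (["subject"]
--             + [oc for c in colnames for oc in _TABLE.get(c, [c])]
--             + ["alcohol"])
-- ===== Notes on version B (the rewrite author's own statement) =====
-- stated objective: simpler
-- what changed: Replaces the if/elif cascade with nested loops and a per-call sort by a precomputed name->output-names table and one flat comprehension pass.
import Mathlib
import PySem

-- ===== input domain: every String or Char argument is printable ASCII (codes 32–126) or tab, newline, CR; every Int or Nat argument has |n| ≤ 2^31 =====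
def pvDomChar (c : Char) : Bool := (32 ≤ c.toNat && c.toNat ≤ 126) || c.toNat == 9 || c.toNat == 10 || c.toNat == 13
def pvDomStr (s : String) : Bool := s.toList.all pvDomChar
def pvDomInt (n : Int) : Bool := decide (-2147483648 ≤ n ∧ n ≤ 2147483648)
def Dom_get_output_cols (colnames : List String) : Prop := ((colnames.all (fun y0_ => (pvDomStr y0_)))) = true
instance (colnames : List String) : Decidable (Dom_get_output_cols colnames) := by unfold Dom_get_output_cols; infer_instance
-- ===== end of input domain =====

-- B replaces A's if/elif cascade with nested loops and per-call sort by one precomputed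
-- name→output-names table and a single flat pass (objective: simpler).

-- ===== PORT A =====
def JOB_DICT : PySem.Dict String (List Int) := PySem.Dict.ofList
  [("teacher", [1, 0, 0, 0, 0]), ("health", [0, 1, 0, 0, 0]), ("services", [0, 0, 1, 0, 0]),
   ("at_home", [0, 0, 0, 1, 0]), ("other", [0, 0, 0, 0, 1])]

def REASON_DICT : PySem.Dict String (List Int) := PySem.Dict.ofList
  [("home", [1, 0, 0, 0]), ("reputation", [0, 1, 0, 0]), ("course", [0, 0, 1, 0]), ("other", [0, 0, 0, 1])]

def GUARDIAN_DICT : PySem.Dict String (List Int) := PySem.Dict.ofList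
  [("mother", [1, 0, 0]), ("father", [0, 1, 0]), ("other", [0, 0, 1])]

-- v.index(1): every value in the dicts above contains a 1, so the ValueError branch
-- (index? = none) is unreachable; .getD 0 only fills the Option.
def expand_options (colvalues : PySem.Dict String (List Int)) : List String :=
  let options := PySem.List.sorted
    (colvalues.items.map (fun kv => (kv.1, (PySem.List.index? kv.2 1).getD 0)))
    (fun p => p.2) false
  options.map (fun p => p.1)

def get_output_cols (colnames : List String) : List String :=
  let ocolnames : List String := []
  let ocolnames := ocolnames ++ ["subject"]
  let ocolnames := colnames.foldl (fun ocolnames colname =>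
    if colname ∈ (["Mjob", "Fjob"] : List String) then
      (expand_options JOB_DICT).foldl
        (fun acc option => acc ++ [PySem.Str.join ":" [colname, option]]) ocolnames
    else if colname = "reason" then
      (expand_options REASON_DICT).foldl
        (fun acc option => acc ++ [PySem.Str.join ":" [colname, option]]) ocolnames
    else if colname = "guardian" then
      (expand_options GUARDIAN_DICT).foldl
        (fun acc option => acc ++ [PySem.Str.join ":" [colname, option]]) ocolnames
    else if colname ∈ (["Dalc", "Walc"] : List String) then
      ocolnames
    else
      ocolnames ++ [colname]) ocolnames
  ocolnames ++ ["alcohol"]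

-- ===== PORT B =====
def pvTable : PySem.Dict String (List String) := PySem.Dict.ofList
  [("Mjob", ["Mjob:teacher", "Mjob:health", "Mjob:services", "Mjob:at_home", "Mjob:other"]),
   ("Fjob", ["Fjob:teacher", "Fjob:health", "Fjob:services", "Fjob:at_home", "Fjob:other"]),
   ("reason", ["reason:home", "reason:reputation", "reason:course", "reason:other"]),
   ("guardian", ["guardian:mother", "guardian:father", "guardian:other"]),
   ("Dalc", []), ("Walc", [])]

def get_output_cols_alt (colnames : List String) : List String :=
  ["subject"] ++ colnames.flatMap (fun c => pvTable.getD c [c]) ++ ["alcohol"]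

-- ===== PRECONDITION & SPEC =====
def Spec_get_output_cols (colnames : List String) (out : List String) : Prop := out = get_output_cols_alt colnames
instance (colnames : List String) (out : List String) : Decidable (Spec_get_output_cols colnames out) := by unfold Spec_get_output_cols; infer_instance

-- ===== CLAIM (what is proved, stated in full; the proofs are below) =====
def Claim_equal_get_output_cols : Prop := ∀ (colnames : List String), Dom_get_output_cols colnames → Spec_get_output_cols colnames (get_output_cols colnames)

-- ===== LEMMAS AND PROOFS =====

-- A's loop body appends, to the accumulator, exactly the rows B's table yields for that column.
theorem pv_step_eq (acc : List String) (c : String) :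
    (if c ∈ (["Mjob", "Fjob"] : List String) then
      (expand_options JOB_DICT).foldl
        (fun acc option => acc ++ [PySem.Str.join ":" [c, option]]) acc
    else if c = "reason" then
      (expand_options REASON_DICT).foldl
        (fun acc option => acc ++ [PySem.Str.join ":" [c, option]]) acc
    else if c = "guardian" then
      (expand_options GUARDIAN_DICT).foldl
        (fun acc option => acc ++ [PySem.Str.join ":" [c, option]]) acc
    else if c ∈ (["Dalc", "Walc"] : List String) then acc
    else acc ++ [c]) = acc ++ pvTable.getD c [c] := by
  by_cases h1 : c = "Mjob"
  · subst h1
    rw [if_pos (by decide : "Mjob" ∈ (["Mjob", "Fjob"] : List String)),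
        PySem.List.foldl_append_singleton_eq_map]
    congr 1
  by_cases h2 : c = "Fjob"
  · subst h2
    rw [if_pos (by decide : "Fjob" ∈ (["Mjob", "Fjob"] : List String)),
        PySem.List.foldl_append_singleton_eq_map]
    congr 1
  by_cases h3 : c = "reason"
  · subst h3
    rw [if_neg (by decide), if_pos rfl, PySem.List.foldl_append_singleton_eq_map]
    congr 1
  by_cases h4 : c = "guardian"
  · subst h4
    rw [if_neg (by decide), if_neg (by decide), if_pos rfl,
        PySem.List.foldl_append_singleton_eq_map]
    congr 1
  by_cases h5 : c = "Dalc"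
  · subst h5
    rw [if_neg (by decide), if_neg (by decide), if_neg (by decide), if_pos (by decide),
        show pvTable.getD "Dalc" ["Dalc"] = [] from by decide, List.append_nil]
  by_cases h6 : c = "Walc"
  · subst h6
    rw [if_neg (by decide), if_neg (by decide), if_neg (by decide), if_pos (by decide),
        show pvTable.getD "Walc" ["Walc"] = [] from by decide, List.append_nil]
  rw [if_neg (by simp [h1, h2]), if_neg h3, if_neg h4, if_neg (by simp [h5, h6])]
  congr 1
  rw [show pvTable = PySem.Dict.mk
    [("Mjob", ["Mjob:teacher", "Mjob:health", "Mjob:services", "Mjob:at_home", "Mjob:other"]),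
     ("Fjob", ["Fjob:teacher", "Fjob:health", "Fjob:services", "Fjob:at_home", "Fjob:other"]),
     ("reason", ["reason:home", "reason:reputation", "reason:course", "reason:other"]),
     ("guardian", ["guardian:mother", "guardian:father", "guardian:other"]),
     ("Dalc", []), ("Walc", [])] from by decide]
  simp [PySem.Dict.getD_eq_get?_getD, PySem.Dict.get?,
    Ne.symm h1, Ne.symm h2, Ne.symm h3, Ne.symm h4, Ne.symm h5, Ne.symm h6]

theorem pv_loop (l : List String) (acc : List String) :
    l.foldl (fun ocolnames colname =>
      if colname ∈ (["Mjob", "Fjob"] : List String) then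
        (expand_options JOB_DICT).foldl
          (fun a option => a ++ [PySem.Str.join ":" [colname, option]]) ocolnames
      else if colname = "reason" then
        (expand_options REASON_DICT).foldl
          (fun a option => a ++ [PySem.Str.join ":" [colname, option]]) ocolnames
      else if colname = "guardian" then
        (expand_options GUARDIAN_DICT).foldl
          (fun a option => a ++ [PySem.Str.join ":" [colname, option]]) ocolnames
      else if colname ∈ (["Dalc", "Walc"] : List String) then ocolnames
      else ocolnames ++ [colname]) acc
    = acc ++ l.flatMap (fun c => pvTable.getD c [c]) := by
  induction l generalizing acc with
  | nil => simp
  | cons c t ih => rw [List.foldl_cons, pv_step_eq, ih, List.flatMap_cons, List.append_assoc]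

-- ===== VERDICT (by name: the statement is the Claim_ definition above) =====
theorem get_output_cols_spec : Claim_equal_get_output_cols := by
  intro colnames _
  unfold Spec_get_output_cols get_output_cols get_output_cols_alt
  simp only [List.nil_append, pv_loop]
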